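-- pv_equiv track=rewrite | github.com/pypi-data/pypi-mirror-219 | packages/ezq-driver/ezq_driver-2.4.2-py3-none-any.whl/ezq_driver/utils.py | find_best_tap
-- ===== SOURCE A (Python) =====
-- def find_best_tap(arr: list) -> int:
--     """
--     此函数用于找出数组中离1最远的0的的位置
--
--     Args:
--         arr (list): 输入数组
--
--     Returns:
--         寻找最佳tap值
--     """
--     # 初始化变量
--     max_distance = -1
--     start_index = -1
--     current_start_index = -1
--     arr_len = len(arr)
--     # 遍历数组
--     for i in range(arr_len):
--         if arr[i] == 0:
--             # 如果当前值为0，则更新起始位置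
--             if current_start_index == -1:
--                 current_start_index = i
--         else:
--             # 如果当前值为1，则更新最大距离和对应的起始和终止位置
--             if current_start_index != -1 and i - current_start_index > max_distance:
--                 max_distance = i - current_start_index
--                 start_index = current_start_index
--             current_start_index = -1
--     # 如果最后一段连续的0的长度大于已知的最大距离，则更新最大距离和对应的起始和终止位置
--     if current_start_index != -1 and arr_len - current_start_index > max_distance:
--         max_distance = arr_len - current_start_index
--         start_index = current_start_index
--     if start_index == 0:
--         return 0
--     elif start_index + max_distance - 1 == arr_len - 1:
--         return arr_len - 1
--     else:
--         return int(start_index + max_distance / 2)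
-- ===== SOURCE B (Python) =====
-- def _has_zero_window(arr, k):
--     """True iff arr contains k consecutive zeros."""
--     run = 0
--     for x in arr:
--         run = run + 1 if x == 0 else 0
--         if run >= k:
--             return True
--     return False
--
--
-- def _first_window_start(arr, k):
--     """Start index of the first window of k consecutive zeros, or -1."""
--     run = 0
--     for i, x in enumerate(arr):
--         run = run + 1 if x == 0 else 0
--         if run == k:
--             return i - k + 1
--     return -1
--
--
-- def find_best_tap(arr: list) -> int:
--     """Binary search on the answer: find the maximal zero-run length L by
--     bisecting 'does a window of L consecutive zeros exist?', then locate the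
--     first such window (its start is the start of the earliest longest run)."""
--     n = len(arr)
--     lo, hi = 0, n
--     while lo < hi:
--         mid = (lo + hi + 1) // 2
--         if _has_zero_window(arr, mid):
--             lo = mid
--         else:
--             hi = mid - 1
--     if lo == 0:
--         return -1
--     start = _first_window_start(arr, lo)
--     if start == 0:
--         return 0
--     if start + lo == n:
--         return n - 1
--     return start + lo // 2
-- ===== Notes on version B (the rewrite author's own statement) =====
-- stated objective: alternative
-- what changed: Replaces A's single stateful left-to-right scan (best-run/current-run registers) by a binary search on the answer: bisect the maximal zero-run length L with a 'does a window of L consecutive zeros exist?' predicate, then a separate scan locates the first all-zero window of length L, whose start is the start of the earliest longest run; the tap position is computed from (start, L).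
import Mathlib
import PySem

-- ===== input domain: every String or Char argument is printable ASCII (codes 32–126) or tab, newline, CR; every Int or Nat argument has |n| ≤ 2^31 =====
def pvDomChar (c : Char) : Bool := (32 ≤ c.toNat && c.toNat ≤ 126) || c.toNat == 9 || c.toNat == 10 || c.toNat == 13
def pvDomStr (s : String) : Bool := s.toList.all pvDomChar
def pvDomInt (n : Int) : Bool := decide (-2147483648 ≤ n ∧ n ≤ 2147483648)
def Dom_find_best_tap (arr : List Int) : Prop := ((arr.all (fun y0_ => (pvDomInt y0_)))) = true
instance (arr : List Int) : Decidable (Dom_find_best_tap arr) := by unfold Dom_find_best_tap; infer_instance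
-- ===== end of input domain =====

-- B replaces A's single stateful scan by a binary search on the maximal zero-run length
-- (bisect a window-existence predicate, then locate the first window) — objective: alternative.


-- ===== PORT A =====
-- loop body: state (max_distance, start_index, current_start_index), element (i, arr[i])
def stepA (s : Int × Int × Int) (p : Int × Int) : Int × Int × Int :=
  if p.2 == 0 then
    (if s.2.2 == -1 then (s.1, s.2.1, p.1) else s)
  else
    if s.2.2 != -1 && decide (p.1 - s.2.2 > s.1) then (p.1 - s.2.2, s.2.2, -1)
    else (s.1, s.2.1, -1)

-- post-loop fixup for a trailing run of zeros
def finishA (arr_len : Int) (s : Int × Int × Int) : Int × Int :=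
  if s.2.2 != -1 && decide (arr_len - s.2.2 > s.1) then (arr_len - s.2.2, s.2.2)
  else (s.1, s.2.1)

def find_best_tap (arr : List Int) : Int :=
  let arr_len : Int := (arr.length : Int)
  let s := (PySem.List.enumerate arr 0).foldl stepA (-1, -1, -1)
  let t := finishA arr_len s
  if t.2 == 0 then 0
  else if t.2 + t.1 - 1 == arr_len - 1 then arr_len - 1
  -- int(start_index + max_distance / 2): exact, the value has denominator 2 and
  -- Python's int() truncates toward zero = Int.tdiv
  else (2 * t.2 + t.1).tdiv 2

-- ===== PORT B =====
-- _has_zero_window: run counter with early return True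
def hzwGo : List Int → Int → Int → Bool
  | [], _, _ => false
  | x :: xs, k, run =>
    let run' := if x == 0 then run + 1 else (0 : Int)
    if run' ≥ k then true else hzwGo xs k run'

def has_zero_window (arr : List Int) (k : Int) : Bool := hzwGo arr k 0

-- _first_window_start: run counter with early return i - k + 1, else -1
def fwsGo : List Int → Int → Int → Int → Int
  | [], _, _, _ => -1
  | x :: xs, k, i, run =>
    let run' := if x == 0 then run + 1 else (0 : Int)
    if run' == k then i - k + 1 else fwsGo xs k (i + 1) run'

def first_window_start (arr : List Int) (k : Int) : Int := fwsGo arr k 0 0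

-- midpoint bounds, cited by bsearchB's termination proof
theorem pvMidBounds (lo hi : Int) (h : lo < hi) :
    lo + 1 ≤ PySem.Int.floordiv (lo + hi + 1) 2 ∧ PySem.Int.floordiv (lo + hi + 1) 2 ≤ hi := by
  have hb := PySem.Int.floordiv_two_mid_bounds (lo := lo + 1) (hi := hi) (by omega)
  have he : lo + 1 + hi = lo + hi + 1 := by ring
  rw [he] at hb
  exact hb

-- while lo < hi: mid = (lo + hi + 1) // 2; ...
def bsearchB (arr : List Int) (lo hi : Int) : Int :=
  if h : lo < hi then
    if has_zero_window arr (PySem.Int.floordiv (lo + hi + 1) 2)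
    then bsearchB arr (PySem.Int.floordiv (lo + hi + 1) 2) hi
    else bsearchB arr lo (PySem.Int.floordiv (lo + hi + 1) 2 - 1)
  else lo
termination_by (hi - lo).toNat
decreasing_by
  · have := pvMidBounds lo hi h; omega
  · have := pvMidBounds lo hi h; omega

def find_best_tap_alt (arr : List Int) : Int :=
  let n : Int := (arr.length : Int)
  let L := bsearchB arr 0 n
  if L == 0 then -1
  else
    let start := first_window_start arr L
    if start == 0 then 0
    else if start + L == n then n - 1
    else start + PySem.Int.floordiv L 2

-- ===== PRECONDITION & SPEC =====
def Spec_find_best_tap (arr : List Int) (out : Int) : Prop := out = find_best_tap_alt arr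
instance (arr : List Int) (out : Int) : Decidable (Spec_find_best_tap arr out) := by unfold Spec_find_best_tap; infer_instance

-- ===== CLAIM (what is proved, stated in full; the proofs are below) =====
def Claim_equal_find_best_tap : Prop := ∀ (arr : List Int), Dom_find_best_tap arr → Spec_find_best_tap arr (find_best_tap arr)

-- ===== LEMMAS AND PROOFS =====

-- (length, start) of every maximal run of zeros: the common specification both ports meet
def collectRuns (l : List Int) (i : Int) : List (Int × Int) :=
  match l with
  | [] => []
  | x :: xs =>
    let grp := xs.takeWhile (fun y => (y == 0) == (x == 0))
    let rest := xs.dropWhile (fun y => (y == 0) == (x == 0))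
    let n : Int := 1 + (grp.length : Int)
    if x == 0 then (n, i) :: collectRuns rest (i + n)
    else collectRuns rest (i + n)
termination_by l.length
decreasing_by
  all_goals
    simp only [List.length_cons]
    exact Nat.lt_succ_of_le (List.dropWhile_sublist _).length_le

-- "keep the strictly longer run" update on (length, start) pairs
def updB (a t : Int × Int) : Int × Int := if a.1 < t.1 then t else a

-- running maximum of run lengths
def mstep (m : Int) (t : Int × Int) : Int := max m t.1

-- start of the first run of length ≥ k
def runsFirst : List (Int × Int) → Int → Int
  | [], _ => -1
  | t :: ts, k => if k ≤ t.1 then t.2 else runsFirst ts k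

-- maximum value attained by the running zero counter
def scanMax : List Int → Int → Int
  | [], _ => 0
  | x :: xs, run =>
    let run' := if x == 0 then run + 1 else (0 : Int)
    max run' (scanMax xs run')

theorem foldA_zero_run (b : List Int) (i md si cs : Int)
    (hz : ∀ y ∈ b, y = 0) (hcs : cs ≠ -1) :
    (PySem.List.enumerate b i).foldl stepA (md, si, cs) = (md, si, cs) := by
  induction b generalizing i with
  | nil => simp [PySem.List.enumerate_nil]
  | cons y ys ih =>
    have hy : y = 0 := hz y (by simp)
    rw [PySem.List.enumerate_cons]
    simp only [List.foldl_cons]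
    have : stepA (md, si, cs) (i, y) = (md, si, cs) := by
      simp [stepA, hy, hcs]
    rw [this, ih _ (fun y hy => hz y (by simp [hy]))]

theorem foldA_nonzero_run (b : List Int) (i md si : Int)
    (hz : ∀ y ∈ b, y ≠ 0) :
    (PySem.List.enumerate b i).foldl stepA (md, si, -1) = (md, si, -1) := by
  induction b generalizing i with
  | nil => simp [PySem.List.enumerate_nil]
  | cons y ys ih =>
    have hy : y ≠ 0 := hz y (by simp)
    rw [PySem.List.enumerate_cons]
    simp only [List.foldl_cons]
    have : stepA (md, si, -1) (i, y) = (md, si, -1) := by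
      simp [stepA, hy]
    rw [this, ih _ (fun y hy => hz y (by simp [hy]))]

theorem dropWhile_head_false {α : Type} (p : α → Bool) :
    ∀ (xs : List α) (z : α) (zs : List α), xs.dropWhile p = z :: zs → p z = false := by
  intro xs
  induction xs with
  | nil => intro z zs h; simp [List.dropWhile] at h
  | cons a t ih =>
    intro z zs h
    by_cases hp : p a
    · rw [List.dropWhile_cons_of_pos hp] at h; exact ih z zs h
    · rw [List.dropWhile_cons_of_neg hp] at h
      cases h; simpa using hp

theorem mainA (l : List Int) (i : Int) (hi : 0 ≤ i) : ∀ md si : Int,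
    finishA (i + (l.length : Int)) ((PySem.List.enumerate l i).foldl stepA (md, si, -1))
      = (collectRuns l i).foldl updB (md, si) := by
  fun_induction collectRuns l i with
  | case1 i =>
    intro md si
    simp [PySem.List.enumerate_nil, finishA]
  | case2 i x xs grp rest n hx ih =>
    intro md si
    have hx0 : x = 0 := by simpa using hx
    have hiNe : (i != (-1 : Int)) = true := by rw [bne_iff_ne]; omega
    have hgrp : ∀ y ∈ grp, y = 0 := by
      intro y hy
      have hp := List.mem_takeWhile_imp (by simpa only [grp] using hy)
      simp only [hx, beq_iff_eq] at hp
      simpa using hp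
    have hsplit : xs = grp ++ rest := by
      simp only [grp, rest]; rw [List.takeWhile_append_dropWhile]
    have h1 : stepA (md, si, -1) (i, x) = (md, si, i) := by
      simp [stepA, hx0]
    rcases hre : rest with _ | ⟨z, zs⟩
    · -- trailing zero run
      have hxs : xs = grp := by rw [hsplit, hre, List.append_nil]
      rw [PySem.List.enumerate_cons, List.foldl_cons, h1, hxs,
        foldA_zero_run grp (i+1) md si i hgrp (by omega)]
      simp only [collectRuns, List.foldl_cons, List.foldl_nil, finishA, updB,
        hiNe, Bool.true_and, List.length_cons, n, decide_eq_true_eq]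
      split_ifs with c1 c2 c2 <;>
        first
        | (simp only [Prod.mk.injEq]; constructor <;> push_cast at * <;> omega)
        | rfl
    · -- a nonzero element follows the zero run
      have hz : z ≠ 0 := by
        have hp := dropWhile_head_false (fun y => (y == 0) == (x == 0)) xs z zs
          (by simpa only [rest] using hre)
        simp only [hx] at hp
        simpa using hp
      have hstart : i + 1 + (grp.length : Int) = i + n := by simp only [n]; omega
      have hu : stepA (md, si, i) (i + n, z) = ((updB (md, si) (n, i)).1, (updB (md, si) (n, i)).2, -1) := by
        simp only [stepA, updB]
        have : ((z : Int) == 0) = false := by simpa using hz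
        simp only [this, Bool.false_eq_true, if_false, hiNe, Bool.true_and]
        have hc : (i + n - i > md) ↔ (md < n) := by omega
        by_cases h : md < n
        · rw [if_pos (by simpa [decide_eq_true_iff] using hc.mpr h), if_pos h]
          simp only [Prod.mk.injEq]
          constructor <;> first | omega | trivial
        · rw [if_neg (by simpa [decide_eq_true_iff] using fun hh => h (hc.mp hh)), if_neg h]
      have hu2 : stepA ((updB (md, si) (n, i)).1, (updB (md, si) (n, i)).2, -1) (i + n, z)
          = ((updB (md, si) (n, i)).1, (updB (md, si) (n, i)).2, -1) := by
        have : ((z : Int) == 0) = false := by simpa using hz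
        simp [stepA, this]
      rw [PySem.List.enumerate_cons, List.foldl_cons, h1, hsplit, hre,
        PySem.List.enumerate_append, List.foldl_append,
        foldA_zero_run grp (i+1) md si i hgrp (by omega), hstart,
        PySem.List.enumerate_cons, List.foldl_cons, hu]
      rw [hre] at ih
      have := ih (by omega) (updB (md, si) (n, i)).1 (updB (md, si) (n, i)).2
      rw [PySem.List.enumerate_cons, List.foldl_cons, hu2] at this
      rw [show i + ((((x :: (grp ++ z :: zs)).length : Nat)) : Int)
            = (i + n) + (((z :: zs).length : Nat) : Int) from by
            simp only [n, List.length_cons, List.length_append]; push_cast; omega]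
      rw [this, List.foldl_cons, Prod.mk.eta]
  | case3 i x xs grp rest n hx ih =>
    intro md si
    have hx0 : x ≠ 0 := by simpa using hx
    have hxb : ((x : Int) == 0) = false := by simpa using hx0
    have hgrp : ∀ y ∈ grp, y ≠ 0 := by
      intro y hy
      have hp := List.mem_takeWhile_imp (by simpa only [grp] using hy)
      rw [hxb] at hp
      simpa using hp
    have hsplit : xs = grp ++ rest := by
      simp only [grp, rest]; rw [List.takeWhile_append_dropWhile]
    have h1 : stepA (md, si, -1) (i, x) = (md, si, -1) := by
      simp [stepA, hxb]
    rw [PySem.List.enumerate_cons, List.foldl_cons, h1, hsplit,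
      PySem.List.enumerate_append, List.foldl_append,
      foldA_nonzero_run grp (i+1) md si hgrp,
      show i + 1 + (grp.length : Int) = i + n from by simp only [n]; omega,
      show i + ((((x :: (grp ++ rest)).length : Nat)) : Int) = (i + n) + ((rest.length : Nat) : Int) from by
        simp only [n, List.length_cons, List.length_append]; push_cast; omega]
    exact ih (by omega) md si

theorem collectRuns_bounds (l : List Int) (i : Int) (hi : 0 ≤ i) :
    ∀ p ∈ collectRuns l i, 1 ≤ p.1 ∧ 0 ≤ p.2 := by
  fun_induction collectRuns l i with
  | case1 => simp
  | case2 i x xs grp rest n hx ih =>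
    intro p hp
    simp only [List.mem_cons] at hp
    rcases hp with rfl | hp
    · constructor
      · simp only [n]; omega
      · exact hi
    · exact ih (by simp only [n]; omega) p hp
  | case3 i x xs grp rest n hx ih =>
    intro p hp
    exact ih (by simp only [n]; omega) p hp

theorem foldl_updB_mem (rs : List (Int × Int)) (a : Int × Int) :
    rs.foldl updB a = a ∨ rs.foldl updB a ∈ rs := by
  induction rs generalizing a with
  | nil => simp
  | cons r t ih =>
    simp only [List.foldl_cons]
    rcases ih (updB a r) with h | h
    · rw [h]; unfold updB; split_ifs
      · right; simp
      · left; rfl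
    · right; simp [h]

theorem tdiv_split (bs bn : Int) (h1 : 1 ≤ bs) (h2 : 1 ≤ bn) :
    (2 * bs + bn).tdiv 2 = bs + PySem.Int.floordiv bn 2 := by
  rw [PySem.Int.floordiv_eq_ediv_of_pos (by omega)]
  rw [Int.tdiv_eq_ediv_of_nonneg (by omega)]
  omega

-- ---- B-side lemmas ----

theorem scanMax_nonneg (l : List Int) : ∀ run : Int, 0 ≤ scanMax l run := by
  induction l with
  | nil => intro run; simp [scanMax]
  | cons x xs ih =>
    intro run
    simp only [scanMax]
    exact le_trans (ih _) (le_max_right _ _)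

theorem scanMax_le (l : List Int) : ∀ run : Int, scanMax l run ≤ max run 0 + (l.length : Int) := by
  induction l with
  | nil =>
    intro run
    simp only [scanMax, List.length_nil, Int.natCast_zero, add_zero]
    exact le_max_right _ _
  | cons x xs ih =>
    intro run
    simp only [scanMax, List.length_cons]
    by_cases hx : (x == 0) = true
    · rw [if_pos hx]
      have h2 := ih (run + 1)
      apply max_le
      · rcases max_cases run (0:Int) with ⟨h,_⟩|⟨h,_⟩ <;> push_cast <;> omega
      · rcases max_cases run (0:Int) with ⟨h,_⟩|⟨h,_⟩ <;>
          rcases max_cases (run+1) (0:Int) with ⟨h',_⟩|⟨h',_⟩ <;>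
          rw [h'] at h2 <;> push_cast at h2 ⊢ <;> omega
    · rw [if_neg hx]
      have h2 := ih 0
      apply max_le
      · rcases max_cases run (0:Int) with ⟨h,_⟩|⟨h,_⟩ <;> push_cast <;> omega
      · rcases max_cases run (0:Int) with ⟨h,_⟩|⟨h,_⟩ <;>
          rcases max_cases (0:Int) (0:Int) with ⟨h',_⟩|⟨h',_⟩ <;>
          rw [h'] at h2 <;> push_cast at h2 ⊢ <;> omega

theorem hzwGo_iff (l : List Int) : ∀ (k run : Int), 0 < k →
    (hzwGo l k run = true ↔ k ≤ scanMax l run) := by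
  induction l with
  | nil => intro k run hk; simp [hzwGo, scanMax]; omega
  | cons x xs ih =>
    intro k run hk
    simp only [hzwGo, scanMax]
    by_cases hge : (if (x == 0) = true then run + 1 else (0 : Int)) ≥ k
    · rw [if_pos hge]
      constructor
      · intro _; exact le_trans hge (le_max_left _ _)
      · intro _; rfl
    · rw [if_neg hge]
      rw [ih k _ hk]
      constructor
      · intro h; exact le_trans h (le_max_right _ _)
      · intro h
        rcases le_max_iff.mp h with h1 | h1
        · exact absurd h1 hge
        · exact h1

theorem mfold_max (rs : List (Int × Int)) : ∀ a b : Int,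
    rs.foldl mstep (max a b) = max a (rs.foldl mstep b) := by
  induction rs with
  | nil => intro a b; simp
  | cons t ts ih =>
    intro a b
    simp only [List.foldl_cons, mstep]
    rw [max_assoc, ih]

theorem le_mfold (rs : List (Int × Int)) : ∀ b : Int, b ≤ rs.foldl mstep b := by
  induction rs with
  | nil => intro b; simp
  | cons t ts ih =>
    intro b
    simp only [List.foldl_cons, mstep]
    exact le_trans (le_max_left _ _) (ih _)

-- maximal all-zero prefix pushes the counter to run + |zs|
theorem scanMax_zeros (zs : List Int) : ∀ (rest : List Int) (run : Int),
    zs ≠ [] → (∀ y ∈ zs, y = 0) →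
    scanMax (zs ++ rest) run = max (run + (zs.length : Int)) (scanMax rest (run + (zs.length : Int))) := by
  induction zs with
  | nil => intro rest run h _; exact absurd rfl h
  | cons z zs' ih =>
    intro rest run _ hz
    have hz0 : ((z : Int) == 0) = true := by simpa using hz z (by simp)
    simp only [List.cons_append, scanMax, hz0, if_pos, List.length_cons]
    rcases eq_or_ne zs' [] with rfl | hne
    · simp only [List.nil_append, List.length_nil]
      norm_num
    · rw [ih rest (run + 1) hne (fun y hy => hz y (by simp [hy]))]
      push_cast
      rw [show run + 1 + (zs'.length : Int) = run + ((zs'.length : Int) + 1) from by ring]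
      rw [← max_assoc, max_eq_right (by omega : run + 1 ≤ run + ((zs'.length : Int) + 1))]

theorem scanMax_reset (ys : List Int) (r : Int)
    (h : ys = [] ∨ ∃ z zs, ys = z :: zs ∧ z ≠ 0) : scanMax ys r = scanMax ys 0 := by
  rcases h with rfl | ⟨z, zs, rfl, hz⟩
  · rfl
  · have hzb : ((z : Int) == 0) = false := by simpa using hz
    simp only [scanMax]
    rw [if_neg (by simp [hzb]), if_neg (by simp [hzb])]

theorem scanMax_nonzeros (zs : List Int) : ∀ rest : List Int,
    (∀ y ∈ zs, y ≠ 0) → scanMax (zs ++ rest) 0 = scanMax rest 0 := by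
  induction zs with
  | nil => intro rest _; rfl
  | cons z zs' ih =>
    intro rest hz
    have hzb : ((z : Int) == 0) = false := by simpa using hz z (by simp)
    simp only [List.cons_append, scanMax]
    rw [if_neg (by simp [hzb])]
    rw [ih rest (fun y hy => hz y (by simp [hy]))]
    exact max_eq_right (scanMax_nonneg rest 0)

theorem fws_zeros (zs : List Int) : ∀ (rest : List Int) (k i run : Int),
    (∀ y ∈ zs, y = 0) → run < k →
    fwsGo (zs ++ rest) k i run
      = if k ≤ run + (zs.length : Int) then i - run
        else fwsGo rest k (i + (zs.length : Int)) (run + (zs.length : Int)) := by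
  induction zs with
  | nil =>
    intro rest k i run _ hrun
    simp only [List.nil_append, List.length_nil, Int.natCast_zero, add_zero]
    rw [if_neg (by omega)]
  | cons z zs' ih =>
    intro rest k i run hz hrun
    have hz0 : ((z : Int) == 0) = true := by simpa using hz z (by simp)
    simp only [List.cons_append, fwsGo, List.length_cons]
    rw [if_pos hz0]
    by_cases hk : run + 1 = k
    · rw [if_pos (by simpa using hk)]
      rw [if_pos (by push_cast; omega)]
      omega
    · rw [if_neg (by simpa using hk)]
      rw [ih rest k (i + 1) (run + 1) (fun y hy => hz y (by simp [hy])) (by omega)]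
      push_cast
      by_cases hc : k ≤ run + ((zs'.length : Int) + 1)
      · rw [if_pos (by omega), if_pos hc]
        omega
      · rw [if_neg (by omega), if_neg hc]
        congr 1 <;> omega

theorem fws_reset (ys : List Int) (k i r : Int)
    (h : ys = [] ∨ ∃ z zs, ys = z :: zs ∧ z ≠ 0) : fwsGo ys k i r = fwsGo ys k i 0 := by
  rcases h with rfl | ⟨z, zs, rfl, hz⟩
  · rfl
  · have hzb : ((z : Int) == 0) = false := by simpa using hz
    simp only [fwsGo, hzb, Bool.false_eq_true, if_false]

theorem fws_nonzeros (zs : List Int) : ∀ (rest : List Int) (k i : Int),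
    (∀ y ∈ zs, y ≠ 0) → 1 ≤ k →
    fwsGo (zs ++ rest) k i 0 = fwsGo rest k (i + (zs.length : Int)) 0 := by
  induction zs with
  | nil => intro rest k i _ _; simp
  | cons z zs' ih =>
    intro rest k i hz hk
    have hzb : ((z : Int) == 0) = false := by simpa using hz z (by simp)
    simp only [List.cons_append, fwsGo, List.length_cons, hzb, Bool.false_eq_true, if_false]
    rw [if_neg (by simp only [beq_iff_eq]; omega)]
    rw [ih rest k (i + 1) (fun y hy => hz y (by simp [hy])) hk]
    congr 1
    push_cast
    ring

-- the rest after a maximal group is empty or starts with the opposite kind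
theorem rest_shape (x : Int) (xs : List Int) (hx : (x == 0) = true) :
    xs.dropWhile (fun y => (y == 0) == (x == 0)) = []
    ∨ ∃ z zs, xs.dropWhile (fun y => (y == 0) == (x == 0)) = z :: zs ∧ z ≠ 0 := by
  rcases hre : xs.dropWhile (fun y => (y == 0) == (x == 0)) with _ | ⟨z, zs⟩
  · left; rfl
  · right
    refine ⟨z, zs, rfl, ?_⟩
    have hp := dropWhile_head_false (fun y => (y == 0) == (x == 0)) xs z zs hre
    simp only [hx] at hp
    simpa using hp

theorem scanMax_runs (l : List Int) (i : Int) :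
    scanMax l 0 = (collectRuns l i).foldl mstep 0 := by
  fun_induction collectRuns l i with
  | case1 i => rfl
  | case2 i x xs grp rest n hx ih =>
    have hgrp : ∀ y ∈ x :: grp, y = 0 := by
      intro y hy
      rcases List.mem_cons.mp hy with rfl | hy
      · simpa using hx
      · have hp := List.mem_takeWhile_imp (by simpa only [grp] using hy)
        simp only [hx, beq_iff_eq] at hp
        simpa using hp
    have hsplit : x :: xs = (x :: grp) ++ rest := by
      simp only [List.cons_append, List.cons.injEq, true_and, grp, rest]
      rw [List.takeWhile_append_dropWhile]
    have hlen : ((x :: grp).length : Int) = n := by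
      simp only [List.length_cons, n]; push_cast; omega
    rw [hsplit, scanMax_zeros (x :: grp) rest 0 (by simp) hgrp, hlen, zero_add,
      scanMax_reset rest n (rest_shape x xs hx), ih]
    simp only [List.foldl_cons, mstep]
    rw [show max (0 : Int) n = max n 0 from max_comm _ _, mfold_max]
  | case3 i x xs grp rest n hx ih =>
    have hxb : ((x : Int) == 0) = false := by simpa using hx
    have hgrp : ∀ y ∈ x :: grp, y ≠ 0 := by
      intro y hy
      rcases List.mem_cons.mp hy with rfl | hy
      · simpa using hx
      · have hp := List.mem_takeWhile_imp (by simpa only [grp] using hy)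
        rw [hxb] at hp
        simpa using hp
    have hsplit : x :: xs = (x :: grp) ++ rest := by
      simp only [List.cons_append, List.cons.injEq, true_and, grp, rest]
      rw [List.takeWhile_append_dropWhile]
    rw [hsplit, scanMax_nonzeros (x :: grp) rest hgrp, ih]

theorem fws_runs (l : List Int) (i : Int) : ∀ k : Int, 1 ≤ k →
    fwsGo l k i 0 = runsFirst (collectRuns l i) k := by
  fun_induction collectRuns l i with
  | case1 i => intro k hk; rfl
  | case2 i x xs grp rest n hx ih =>
    intro k hk
    have hgrp : ∀ y ∈ x :: grp, y = 0 := by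
      intro y hy
      rcases List.mem_cons.mp hy with rfl | hy
      · simpa using hx
      · have hp := List.mem_takeWhile_imp (by simpa only [grp] using hy)
        simp only [hx, beq_iff_eq] at hp
        simpa using hp
    have hsplit : x :: xs = (x :: grp) ++ rest := by
      simp only [List.cons_append, List.cons.injEq, true_and, grp, rest]
      rw [List.takeWhile_append_dropWhile]
    have hlen : ((x :: grp).length : Int) = n := by
      simp only [List.length_cons, n]; push_cast; omega
    rw [hsplit, fws_zeros (x :: grp) rest k i 0 hgrp (by omega), hlen]
    simp only [runsFirst, zero_add]
    by_cases hc : k ≤ n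
    · rw [if_pos hc, if_pos hc]
      omega
    · rw [if_neg hc, if_neg hc]
      rw [fws_reset rest k (i + n) n (rest_shape x xs hx)]
      exact ih k hk
  | case3 i x xs grp rest n hx ih =>
    intro k hk
    have hxb : ((x : Int) == 0) = false := by simpa using hx
    have hgrp : ∀ y ∈ x :: grp, y ≠ 0 := by
      intro y hy
      rcases List.mem_cons.mp hy with rfl | hy
      · simpa using hx
      · have hp := List.mem_takeWhile_imp (by simpa only [grp] using hy)
        rw [hxb] at hp
        simpa using hp
    have hsplit : x :: xs = (x :: grp) ++ rest := by
      simp only [List.cons_append, List.cons.injEq, true_and, grp, rest]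
      rw [List.takeWhile_append_dropWhile]
    have hlen : ((x :: grp).length : Int) = n := by
      simp only [List.length_cons, n]; push_cast; omega
    rw [hsplit, fws_nonzeros (x :: grp) rest k i hgrp hk, hlen]
    exact ih k hk

-- the best-run fold returns (max length, start of the first run attaining it)
theorem updB_fold (rs : List (Int × Int)) : ∀ a : Int × Int,
    rs.foldl updB a
      = if a.1 < rs.foldl mstep a.1
        then (rs.foldl mstep a.1, runsFirst rs (rs.foldl mstep a.1))
        else a := by
  induction rs with
  | nil => intro a; simp
  | cons t ts ih =>
    intro a
    simp only [List.foldl_cons, mstep, runsFirst]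
    by_cases h : a.1 < t.1
    · rw [show updB a t = t from by simp [updB, h], max_eq_right (le_of_lt h)]
      have htm : t.1 ≤ ts.foldl mstep t.1 := le_mfold ts t.1
      rw [if_pos (by omega), ih t]
      by_cases h2 : t.1 < ts.foldl mstep t.1
      · rw [if_pos h2, if_neg (by omega)]
      · rw [if_neg h2]
        have : ts.foldl mstep t.1 = t.1 := le_antisymm (by omega) htm
        rw [this, if_pos (le_refl _)]
    · rw [show updB a t = a from by simp [updB, h], max_eq_left (by omega)]
      rw [ih a]
      by_cases h2 : a.1 < ts.foldl mstep a.1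
      · rw [if_pos h2, if_pos h2, if_neg (by omega)]
      · rw [if_neg h2, if_neg h2]

theorem bsearch_eq (arr : List Int) (M : Int)
    (hchar : ∀ k : Int, 1 ≤ k → (has_zero_window arr k = true ↔ k ≤ M)) :
    ∀ lo hi : Int, 0 ≤ lo → lo ≤ M → M ≤ hi → bsearchB arr lo hi = M := by
  intro lo hi
  fun_induction bsearchB arr lo hi with
  | case1 lo hi h hcheck ih =>
    intro h0 hlM hMh
    have hmid := pvMidBounds lo hi h
    have : PySem.Int.floordiv (lo + hi + 1) 2 ≤ M :=
      (hchar _ (by omega)).mp hcheck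
    exact ih (by omega) this hMh
  | case2 lo hi h hcheck ih =>
    intro h0 hlM hMh
    have hmid := pvMidBounds lo hi h
    have : ¬ (PySem.Int.floordiv (lo + hi + 1) 2 ≤ M) := by
      intro hle
      rw [(hchar _ (by omega)).mpr hle] at hcheck
      exact absurd rfl hcheck
    exact ih h0 hlM (by omega)
  | case3 lo hi h =>
    intro h0 hlM hMh
    omega

-- the shared return formula agrees on both phrasings of the boundary tests
theorem final_formula (M S n : Int) (hM : 1 ≤ M) (hS : 0 ≤ S) :
    (if (S == 0) = true then (0:Int)
     else if (S + M - 1 == n - 1) = true then n - 1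
     else (2 * S + M).tdiv 2)
    = (if (M == 0) = true then (-1:Int)
       else if (S == 0) = true then 0
       else if (S + M == n) = true then n - 1
       else S + PySem.Int.floordiv M 2) := by
  simp only [beq_iff_eq]
  rw [if_neg (by omega : ¬ M = 0)]
  by_cases hz : S = 0
  · rw [if_pos hz, if_pos hz]
  · rw [if_neg hz, if_neg hz]
    by_cases he : S + M = n
    · rw [if_pos (by omega), if_pos he]
    · rw [if_neg (by omega), if_neg he]
      exact tdiv_split S M (by omega) hM

-- ===== VERDICT (by name: the statement is the Claim_ definition above) =====
theorem find_best_tap_spec : Claim_equal_find_best_tap := by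
  unfold Claim_equal_find_best_tap Spec_find_best_tap
  intro arr _
  simp only [find_best_tap, find_best_tap_alt]
  have hmain := mainA arr 0 le_rfl (-1) (-1)
  rw [zero_add] at hmain
  have hM0 : (0:Int) ≤ scanMax arr 0 := scanMax_nonneg arr 0
  have hMn : scanMax arr 0 ≤ (arr.length : Int) := by
    have := scanMax_le arr 0
    simpa using this
  have hchar : ∀ k : Int, 1 ≤ k → (has_zero_window arr k = true ↔ k ≤ scanMax arr 0) := by
    intro k hk
    exact hzwGo_iff arr k 0 (by omega)
  have hL : bsearchB arr 0 (arr.length : Int) = scanMax arr 0 :=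
    bsearch_eq arr (scanMax arr 0) hchar 0 (arr.length : Int) le_rfl hM0 hMn
  rw [hL]
  cases hruns : collectRuns arr 0 with
  | nil =>
    have hM : scanMax arr 0 = 0 := by rw [scanMax_runs arr 0, hruns]; rfl
    rw [hruns] at hmain
    simp only [List.foldl_nil] at hmain
    rw [hmain, hM]
    rw [if_neg (by decide), if_neg (by simp only [beq_iff_eq]; omega), if_pos (by decide)]
    decide
  | cons r rs =>
    have hbounds := collectRuns_bounds arr 0 le_rfl
    have hr1 : 1 ≤ r.1 := (hbounds r (by rw [hruns]; simp)).1
    have hMruns : scanMax arr 0 = (r :: rs).foldl mstep 0 := by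
      rw [scanMax_runs arr 0, hruns]
    have hmax1 : r.1 ≤ (r :: rs).foldl mstep 0 := by
      simp only [List.foldl_cons, mstep]
      rw [max_eq_right (by omega)]
      exact le_mfold rs r.1
    have hM1 : 1 ≤ scanMax arr 0 := by rw [hMruns]; omega
    have hminus : (r :: rs).foldl mstep ((-1, -1) : Int × Int).1 = (r :: rs).foldl mstep 0 := by
      show (r :: rs).foldl mstep (-1) = _
      simp only [List.foldl_cons, mstep]
      rw [max_eq_right (by omega), max_eq_right (by omega)]
    have hA : (r :: rs).foldl updB (-1, -1)
        = (scanMax arr 0, runsFirst (r :: rs) (scanMax arr 0)) := by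
      rw [updB_fold (r :: rs) (-1, -1), hminus, ← hMruns]
      rw [if_pos (by show (-1:Int) < scanMax arr 0; omega)]
    rw [hruns] at hmain
    have hS : first_window_start arr (scanMax arr 0) = runsFirst (r :: rs) (scanMax arr 0) := by
      unfold first_window_start
      rw [fws_runs arr 0 (scanMax arr 0) hM1, hruns]
    have hSstart : 0 ≤ runsFirst (r :: rs) (scanMax arr 0) := by
      have hmem := foldl_updB_mem (r :: rs) (-1, -1)
      rw [hA] at hmem
      rcases hmem with hEq | hmem
      · exfalso
        have : scanMax arr 0 = -1 := congrArg Prod.fst hEq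
        omega
      · exact (hbounds _ (by rw [hruns]; exact hmem)).2
    rw [hmain, hA, hS]
    exact final_formula (scanMax arr 0) (runsFirst (r :: rs) (scanMax arr 0))
      (arr.length : Int) hM1 hSstart
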